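-- pv_equiv track=rewrite | github.com/isakchoe/TIL | algorithm /programmers/2021_kakao_신규아이디추천.py | solution
-- ===== SOURCE A (Python) =====
-- def solution(new_id):
--     # 아이디 규칙
--     #  3자이상 15자 이하
--     #  마침표. 처음, 끝 X 연솓 x
-- #     주어진 조건에 맞게 구현 끝!
--
--
--     #  1단계 대문자--> 소문자
--     new_id = new_id.lower()
--
--     possible = ['-', '_', '.',]
--
--     # 2단계
--     new_list = []
--     for char in new_id:
--         if char.isdigit() or char.isalpha() or char in possible:
--             new_list.append(char)
--
--
--     # 3단계
--     new_list_3 = []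
--     count = 0
--     for i in range(len(new_list)):
--         if new_list[i] == '.':
--             count += 1
--             # 마지막도 '.' 일경우 넣어줘야한다.
--             if i == len(new_list)-1:
--                 new_list_3.append('.')
--         else:
--             if count == 0:
--                 new_list_3.append(new_list[i])
--             else:
--                 new_list_3.append('.')
--                 new_list_3.append(new_list[i])
--                 count = 0
--
--     # 4단계
--     # 인덱스 에러 처리해줘야 한다. (빈문자열일경우!)
--     if len(new_list_3)!=0 and new_list_3[0] == '.':
--         new_list_3.pop(0)
--
--     if len(new_list_3) !=0 and new_list_3[-1] == '.':
--         new_list_3.pop()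
--
--     # 5단계
--     if len(new_list_3) == 0 :
--         new_list_3.append('a')
--
--     # 6단계
--     while len(new_list_3) > 15:
--         new_list_3.pop()
--
--     # 마침표 확인
--     if new_list_3[-1] == '.':
--         new_list_3.pop()
--
--
--     # 7 단계
--     while len(new_list_3) <=2:
--         temp = new_list_3[-1]
--         new_list_3.append(temp)
--
--     return ''.join(new_list_3)
-- ===== SOURCE B (Python) =====
-- def solution(new_id):
--     # One fused pass: lowercase-filter and collapse dot runs on the fly,
--     # then strip / slice / arithmetic padding instead of pop-loops.
--     out = []
--     for c in new_id.lower():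
--         if 'a' <= c <= 'z' or '0' <= c <= '9' or c in '-_':
--             out.append(c)
--         elif c == '.' and not (out and out[-1] == '.'):
--             out.append(c)
--     s = ''.join(out).strip('.')
--     if not s:
--         s = 'a'
--     s = s[:15].rstrip('.')
--     return s + s[-1] * (3 - len(s))
-- ===== Notes on version B (the rewrite author's own statement) =====
-- stated objective: simpler
-- what changed: A's separate filter pass, count-based dot-collapsing index loop and three pop-based while loops are replaced by one fused filter+dedup pass over the lowered string followed by strip('.'), a [:15] slice with rstrip('.'), and arithmetic padding s + s[-1]*(3-len(s)).
import Mathlib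
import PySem

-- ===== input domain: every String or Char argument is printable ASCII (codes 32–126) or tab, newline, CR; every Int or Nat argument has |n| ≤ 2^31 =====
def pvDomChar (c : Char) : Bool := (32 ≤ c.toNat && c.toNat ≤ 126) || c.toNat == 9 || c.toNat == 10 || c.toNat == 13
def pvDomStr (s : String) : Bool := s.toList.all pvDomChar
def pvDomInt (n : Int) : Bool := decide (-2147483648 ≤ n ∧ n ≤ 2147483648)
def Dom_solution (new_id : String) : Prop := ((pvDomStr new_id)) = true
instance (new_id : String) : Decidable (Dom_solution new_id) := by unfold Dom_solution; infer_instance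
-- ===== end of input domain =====

-- B replaces A's count-based dot loop and pop-loops with one fused filter/dedup pass
-- plus strip / slice / arithmetic padding (objective: simpler; same return value).

-- ===== PORT A =====
-- step-2 character test: c.isdigit() or c.isalpha() or c in possible (possible = ['-','_','.'])
def okA (c : Char) : Bool :=
  PySem.Chars.isdigit c || PySem.Chars.isalpha c || (['-', '_', '.'] : List Char).contains c

-- step-3 loop `for i in range(len(new_list))` with state (new_list_3 = acc, count);
-- the test `i == len(new_list)-1` becomes `rest = []`.
def step3A (count : Int) (acc : List Char) : List Char → List Char
  | [] => acc
  | c :: rest =>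
    if c = '.' then
      if rest = [] then step3A (count + 1) (acc ++ ['.']) rest
      else step3A (count + 1) acc rest
    else
      if count = 0 then step3A 0 (acc ++ [c]) rest
      else step3A 0 (acc ++ ['.', c]) rest

-- step 6: while len(new_list_3) > 15: pop()
def step6A (l : List Char) : List Char :=
  if l.length > 15 then step6A l.dropLast else l
termination_by l.length
decreasing_by simp [List.length_dropLast]; omega

-- step 7: while len(new_list_3) <= 2: append new_list_3[-1]
-- (on [] Python's new_list_3[-1] would raise IndexError; unreachable — we return l there)
def padA (l : List Char) : List Char :=
  if l.length ≤ 2 then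
    match l.getLast? with
    | some t => padA (l ++ [t])
    | none => l
  else l
termination_by 3 - l.length
decreasing_by simp [List.length_append]; omega

def solution (new_id : String) : String :=
  let nid := PySem.Chars.lower new_id.toList
  -- step 2
  let newList := nid.foldl (fun acc c => if okA c then acc ++ [c] else acc) ([] : List Char)
  -- step 3
  let l3 := step3A 0 [] newList
  -- step 4: pop(0) / pop() of a leading / trailing '.'
  let l4 := if l3.length ≠ 0 ∧ PySem.List.pyGet? l3 0 = some '.' then l3.tail else l3
  let l4b := if l4.length ≠ 0 ∧ PySem.List.pyGet? l4 (-1) = some '.' then l4.dropLast else l4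
  -- step 5
  let l5 := if l4b.length = 0 then l4b ++ ['a'] else l4b
  -- step 6
  let l6 := step6A l5
  let l6b := if PySem.List.pyGet? l6 (-1) = some '.' then l6.dropLast else l6
  -- step 7 and ''.join
  String.ofList (padA l6b)

-- ===== PORT B =====
-- the fused test: 'a' <= c <= 'z' or '0' <= c <= '9' or c in '-_'
def okB (c : Char) : Bool :=
  (decide ('a' ≤ c) && decide (c ≤ 'z')) || (decide ('0' ≤ c) && decide (c ≤ '9'))
    || (['-', '_'] : List Char).contains c

-- the single pass: filter and collapse dot runs against out[-1]
def bpass : List Char → List Char → List Char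
  | acc, [] => acc
  | acc, c :: cs =>
    if okB c then bpass (acc ++ [c]) cs
    else if c = '.' ∧ ¬(acc ≠ [] ∧ PySem.List.pyGet? acc (-1) = some '.') then bpass (acc ++ [c]) cs
    else bpass acc cs

-- hand port of s.rstrip('.') (exact: removes the maximal trailing run of '.')
def rstripDot (l : List Char) : List Char :=
  (l.reverse.dropWhile (fun c => (['.'] : List Char).contains c)).reverse

def solution_alt (new_id : String) : String :=
  let out := bpass [] (PySem.Chars.lower new_id.toList)
  let s0 := PySem.Chars.stripChars out ['.']
  let s1 := if s0 = [] then ['a'] else s0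
  let s2 := rstripDot (PySem.List.slice s1 none (some 15))
  -- s + s[-1] * (3 - len(s)); s[-1] on [] would raise in Python — unreachable
  match PySem.List.pyGet? s2 (-1) with
  | some t => String.ofList (s2 ++ PySem.List.pyRepeat [t] (3 - (s2.length : Int)))
  | none => ""

-- ===== PRECONDITION & SPEC =====
def Spec_solution (new_id : String) (out : String) : Prop := out = solution_alt new_id
instance (new_id : String) (out : String) : Decidable (Spec_solution new_id out) := by unfold Spec_solution; infer_instance

-- ===== CLAIM (what is proved, stated in full; the proofs are below) =====
def Claim_equal_solution : Prop := ∀ (new_id : String), Dom_solution new_id → Spec_solution new_id (solution new_id)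

-- ===== LEMMAS AND PROOFS =====

-- "no two adjacent dots" invariant of the collapsed list
def ndd : List Char → Prop
  | a :: b :: t => ¬(a = '.' ∧ b = '.') ∧ ndd (b :: t)
  | _ => True

-- the two single-character end pops shared by both pipelines
def popHead (l : List Char) : List Char := if l.head? = some '.' then l.tail else l
def popLast (l : List Char) : List Char := if l.getLast? = some '.' then l.dropLast else l

-- one-step unfolding equations (definitional)
theorem step3A_nil (count : Int) (acc : List Char) : step3A count acc [] = acc := rfl

theorem step3A_cons (count : Int) (acc : List Char) (c : Char) (rest : List Char) :
    step3A count acc (c :: rest) =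
      if c = '.' then
        if rest = [] then step3A (count + 1) (acc ++ ['.']) rest
        else step3A (count + 1) acc rest
      else
        if count = 0 then step3A 0 (acc ++ [c]) rest
        else step3A 0 (acc ++ ['.', c]) rest := rfl

theorem bpass_nil (acc : List Char) : bpass acc [] = acc := rfl

theorem bpass_cons (acc : List Char) (c : Char) (cs : List Char) :
    bpass acc (c :: cs) =
      if okB c then bpass (acc ++ [c]) cs
      else if c = '.' ∧ ¬(acc ≠ [] ∧ PySem.List.pyGet? acc (-1) = some '.') then
        bpass (acc ++ [c]) cs
      else bpass acc cs := rfl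

theorem char_le_iff (a b : Char) : (a ≤ b) ↔ a.toNat ≤ b.toNat := by
  rw [Char.le_def, UInt32.le_iff_toNat_le]
  exact Iff.rfl

theorem lower_no_upper (c : Char) : PySem.Chars.isupper (PySem.Chars.lowerChar c) = false := by
  unfold PySem.Chars.lowerChar
  split
  · rename_i h
    have hA : ('A' : Char).toNat = 65 := rfl
    have hZ : ('Z' : Char).toNat = 90 := rfl
    simp only [PySem.Chars.isupper, char_le_iff, hA, hZ, Bool.and_eq_true,
      decide_eq_true_eq] at h
    have hv : (Char.ofNat (c.toNat + 32)).toNat = c.toNat + 32 := by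
      rw [Char.toNat_ofNat, if_pos (Or.inl (by omega))]
    simp only [PySem.Chars.isupper, char_le_iff, hv, hA, hZ, Bool.and_eq_false_iff,
      decide_eq_false_iff_not]
    omega
  · rename_i h
    simpa using h

theorem okB_imp_okA {c : Char} (h : okB c = true) : okA c = true := by
  simp only [okA, okB, PySem.Chars.isdigit, PySem.Chars.isalpha, PySem.Chars.isupper,
    PySem.Chars.islower] at h ⊢
  simp at h ⊢
  tauto

theorem okB_ne_dot {c : Char} (h : okB c = true) : c ≠ '.' := by
  intro hc; subst hc; exact absurd h (by decide)

theorem okA_dot : okA '.' = true := by decide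

theorem okA_eq_lower {c : Char} (h : PySem.Chars.isupper c = false) :
    okA c = (okB c || c == '.') := by
  rw [Bool.eq_iff_iff]
  simp only [okA, okB, PySem.Chars.isdigit, PySem.Chars.isalpha, PySem.Chars.islower, h]
  simp
  tauto

theorem ndd_of_cons {a : Char} {t : List Char} (h : ndd (a :: t)) : ndd t := by
  cases t with
  | nil => trivial
  | cons b t' => exact h.2

theorem ndd_append_last {l : List Char} {c : Char} (h : ndd l)
    (hc : l.getLast? = some '.' → c ≠ '.') : ndd (l ++ [c]) := by
  induction l with
  | nil => trivial
  | cons a t ih =>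
    cases t with
    | nil =>
      refine ⟨?_, trivial⟩
      rintro ⟨ha, hcd⟩
      exact hc (by simp [ha]) hcd
    | cons b t' =>
      simp only [List.cons_append] at *
      exact ⟨h.1, ih h.2 (fun hl => hc (by rw [List.getLast?_cons_cons]; exact hl))⟩

theorem ndd_take {l : List Char} (h : ndd l) (n : Nat) : ndd (l.take n) := by
  induction l generalizing n with
  | nil => simp [ndd]
  | cons a t ih =>
    cases n with
    | zero => trivial
    | succ m =>
      cases t with
      | nil =>
        simp only [List.take, List.take_nil]
        trivial
      | cons b t' =>
        cases m with
        | zero =>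
          simp only [List.take]
          trivial
        | succ k =>
          exact ⟨h.1, ih h.2 (k + 1)⟩

theorem ndd_reverse {l : List Char} (h : ndd l) : ndd l.reverse := by
  induction l with
  | nil => trivial
  | cons a t ih =>
    rw [List.reverse_cons]
    refine ndd_append_last (ih (ndd_of_cons h)) ?_
    intro hl ha
    rw [List.getLast?_reverse] at hl
    cases t with
    | nil => simp at hl
    | cons b t' =>
      simp only [List.head?_cons, Option.some.injEq] at hl
      exact h.1 ⟨ha, hl⟩

theorem dropWhileDot {l : List Char} (h : ndd l) :
    l.dropWhile (fun c => (['.'] : List Char).contains c) =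
      if l.head? = some '.' then l.tail else l := by
  cases l with
  | nil => simp
  | cons a t =>
    by_cases ha : a = '.'
    · subst ha
      rw [List.dropWhile_cons, if_pos (by decide), if_pos (by simp)]
      cases t with
      | nil => simp
      | cons b t' =>
        have hb : b ≠ '.' := fun hb => h.1 ⟨rfl, hb⟩
        rw [List.dropWhile_cons, if_neg (by simp [hb])]
        rfl
    · rw [List.dropWhile_cons, if_neg (by simp [ha]), if_neg (by simp [ha])]

theorem bpass_ndd {acc : List Char} (hacc : ndd acc) (l : List Char) : ndd (bpass acc l) := by
  induction l generalizing acc with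
  | nil => exact hacc
  | cons c cs ih =>
    rw [bpass_cons]
    by_cases h1 : okB c = true
    · rw [if_pos h1]
      exact ih (ndd_append_last hacc (fun _ => okB_ne_dot h1))
    · rw [if_neg h1]
      by_cases h2 : c = '.' ∧ ¬(acc ≠ [] ∧ PySem.List.pyGet? acc (-1) = some '.')
      · rw [if_pos h2]
        refine ih (ndd_append_last hacc ?_)
        intro hl _
        exact h2.2 ⟨fun he => by rw [he] at hl; simp at hl,
          by rw [PySem.List.pyGet?_neg_one]; exact hl⟩
      · rw [if_neg h2]
        exact ih hacc

theorem bpass_skip {acc l : List Char}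
    (hf : ∀ c ∈ l, okA c = false) : bpass acc l = acc := by
  induction l with
  | nil => rfl
  | cons c cs ih =>
    have hca : okA c = false := hf c (by simp)
    have h1 : okB c = false := by
      cases hb : okB c
      · rfl
      · rw [okB_imp_okA hb] at hca; exact absurd hca (by simp)
    have hcd : c ≠ '.' := by
      intro hc; rw [hc, okA_dot] at hca; exact absurd hca (by simp)
    rw [bpass_cons, if_neg (by simp [h1]), if_neg (by simp [hcd])]
    exact ih (fun x hx => hf x (List.mem_cons_of_mem _ hx))

theorem loop_eq (ys : List Char) : ∀ (acc : List Char) (count : Int), 0 ≤ count →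
    (count = 0 → acc.getLast? ≠ some '.') →
    (count ≠ 0 → ys.filter okA ≠ []) →
    (∀ c ∈ ys, PySem.Chars.isupper c = false) →
    step3A count acc (ys.filter okA) = bpass (if count = 0 then acc else acc ++ ['.']) ys := by
  induction ys with
  | nil =>
    intro acc count _ _ hne _
    by_cases hc : count = 0
    · simp [hc, step3A_nil, bpass_nil]
    · exact absurd List.filter_nil (hne hc)
  | cons c cs ih =>
    intro acc count h0 hz hne hup
    have hupc : PySem.Chars.isupper c = false := hup c (by simp)
    have hupcs : ∀ x ∈ cs, PySem.Chars.isupper x = false :=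
      fun x hx => hup x (List.mem_cons_of_mem _ hx)
    by_cases hA : okA c = true
    · rw [List.filter_cons_of_pos hA]
      by_cases hdot : c = '.'
      · subst hdot
        have hkB : okB '.' = false := by decide
        rw [step3A_cons, if_pos rfl]
        by_cases hF : List.filter okA cs = []
        · rw [if_pos hF, hF, step3A_nil]
          have hskip : bpass (acc ++ ['.']) cs = acc ++ ['.'] :=
            bpass_skip
              (fun x hx => by
                have := List.filter_eq_nil_iff.mp hF x hx
                exact Bool.not_eq_true _ ▸ by simpa using this)
          by_cases hc0 : count = 0
          · rw [if_pos hc0, bpass_cons, if_neg (by simp [hkB]),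
              if_pos ⟨rfl, fun hand => hz hc0 (by rw [← PySem.List.pyGet?_neg_one]; exact hand.2)⟩]
            exact hskip.symm
          · rw [if_neg hc0, bpass_cons, if_neg (by simp [hkB]),
              if_neg (by
                rintro ⟨-, hn⟩
                exact hn ⟨by simp, by rw [PySem.List.pyGet?_neg_one, List.getLast?_concat]⟩)]
            exact hskip.symm
        · rw [if_neg hF]
          have hrec := ih acc (count + 1) (by omega) (by intro h; omega) (fun _ => hF) hupcs
          rw [if_neg (by omega)] at hrec
          rw [hrec]
          by_cases hc0 : count = 0
          · rw [if_pos hc0, bpass_cons, if_neg (by simp [hkB]),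
              if_pos ⟨rfl, fun hand => hz hc0 (by rw [← PySem.List.pyGet?_neg_one]; exact hand.2)⟩]
          · rw [if_neg hc0, bpass_cons, if_neg (by simp [hkB]),
              if_neg (by
                rintro ⟨-, hn⟩
                exact hn ⟨by simp, by rw [PySem.List.pyGet?_neg_one, List.getLast?_concat]⟩)]
      · have hB : okB c = true := by
          have he := okA_eq_lower hupc
          rw [hA] at he
          have hd : (c == '.') = false := by simp [hdot]
          rw [hd, Bool.or_false] at he
          exact he.symm
        rw [step3A_cons, if_neg hdot]
        by_cases hc0 : count = 0
        · rw [if_pos hc0, if_pos hc0]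
          have hrec := ih (acc ++ [c]) 0 le_rfl
            (fun _ => by rw [List.getLast?_concat]; simp [hdot])
            (fun h => absurd rfl h) hupcs
          rw [if_pos rfl] at hrec
          rw [hrec, bpass_cons, if_pos hB]
        · rw [if_neg hc0, if_neg hc0]
          have hrec := ih (acc ++ ['.', c]) 0 le_rfl
            (fun _ => by
              rw [show acc ++ ['.', c] = (acc ++ ['.']) ++ [c] by simp,
                List.getLast?_concat]
              simp [hdot])
            (fun h => absurd rfl h) hupcs
          rw [if_pos rfl] at hrec
          rw [hrec, bpass_cons, if_pos hB,
            show acc ++ ['.', c] = (acc ++ ['.']) ++ [c] by simp]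
    · rw [List.filter_cons_of_neg (by simpa using hA)]
      have hB : okB c = false := by
        cases hb : okB c
        · rfl
        · exact absurd (okB_imp_okA hb) hA
      have hcd : c ≠ '.' := by
        intro hc; rw [hc] at hA; exact hA okA_dot
      have hrec := ih acc count h0 hz
        (fun h => by
          have := hne h
          rwa [List.filter_cons_of_neg (by simpa using hA)] at this) hupcs
      have hstep : ∀ b : List Char, bpass b (c :: cs) = bpass b cs := fun b => by
        rw [bpass_cons, if_neg (by simp [hB]), if_neg (fun hand => hcd hand.1)]
      rw [hrec, hstep]

theorem loop_eq0 (L : List Char) (hup : ∀ c ∈ L, PySem.Chars.isupper c = false) :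
    step3A 0 [] (L.filter okA) = bpass [] L := by
  have h := loop_eq L [] 0 le_rfl (by simp) (fun h => absurd rfl h) hup
  rwa [if_pos rfl] at h

theorem rstrip_eq {l : List Char} (h : ndd l) : rstripDot l = popLast l := by
  unfold rstripDot popLast
  rw [dropWhileDot (ndd_reverse h), List.head?_reverse]
  split
  · rw [List.tail_reverse, List.reverse_reverse]
  · rw [List.reverse_reverse]

theorem popHead_ndd {l : List Char} (h : ndd l) : ndd (popHead l) := by
  unfold popHead
  split
  · cases l with
    | nil => trivial
    | cons a t => exact ndd_of_cons h
  · exact h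

theorem strip_eq {l : List Char} (h : ndd l) :
    PySem.Chars.stripChars l ['.'] = popLast (popHead l) := by
  have h2 : PySem.Chars.stripChars l ['.'] = rstripDot (popHead l) := by
    simp only [PySem.Chars.stripChars, rstripDot, popHead]
    rw [dropWhileDot h]
  rw [h2, rstrip_eq (popHead_ndd h)]

theorem popA_head (l : List Char) :
    (if l.length ≠ 0 ∧ PySem.List.pyGet? l 0 = some '.' then l.tail else l) = popHead l := by
  unfold popHead
  rw [PySem.List.pyGet?_zero, ← List.head?_eq_getElem?]
  by_cases h : l.head? = some '.'
  · have hne : l ≠ [] := by intro he; rw [he] at h; simp at h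
    rw [if_pos h, if_pos ⟨by simpa [Ne, List.length_eq_zero_iff] using hne, h⟩]
  · rw [if_neg h, if_neg (fun hc => h hc.2)]

theorem popA_last (l : List Char) :
    (if l.length ≠ 0 ∧ PySem.List.pyGet? l (-1) = some '.' then l.dropLast else l) = popLast l := by
  unfold popLast
  rw [PySem.List.pyGet?_neg_one]
  by_cases h : l.getLast? = some '.'
  · have hne : l ≠ [] := by intro he; rw [he] at h; simp at h
    rw [if_pos h, if_pos ⟨by simpa [Ne, List.length_eq_zero_iff] using hne, h⟩]
  · rw [if_neg h, if_neg (fun hc => h hc.2)]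

theorem popHead_head {l : List Char} (h : ndd l) : (popHead l).head? ≠ some '.' := by
  unfold popHead
  cases l with
  | nil => simp
  | cons a t =>
    by_cases ha : a = '.'
    · subst ha
      rw [if_pos (by simp)]
      cases t with
      | nil => simp
      | cons b t' =>
        simp only [List.tail_cons, List.head?_cons, ne_eq, Option.some.injEq]
        exact fun hb => h.1 ⟨rfl, hb⟩
    · rw [if_neg (by simp [ha])]
      simp [ha]

theorem popLast_head {l : List Char} (h : l.head? ≠ some '.') :
    (popLast l).head? ≠ some '.' := by
  unfold popLast
  split
  · rw [List.dropLast_eq_take, List.head?_take]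
    split
    · simp
    · exact h
  · exact h

theorem popLast_ndd {l : List Char} (h : ndd l) : ndd (popLast l) := by
  unfold popLast
  split
  · rw [List.dropLast_eq_take]
    exact ndd_take h _
  · exact h

theorem popLast_ne {l : List Char} (hne : l ≠ []) (hh : l.head? ≠ some '.') :
    popLast l ≠ [] := by
  unfold popLast
  split
  · rename_i hd
    cases l with
    | nil => simp at hd
    | cons a t =>
      cases t with
      | nil =>
        simp only [List.getLast?_singleton, Option.some.injEq] at hd
        exact absurd (by simp [hd]) hh
      | cons b t' => simp
  · exact hne

theorem step6A_eq_aux : ∀ (n : Nat) (l : List Char), l.length ≤ n → step6A l = l.take 15 := by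
  intro n
  induction n with
  | zero =>
    intro l hl
    rw [step6A, if_neg (by omega), List.take_of_length_le (by omega)]
  | succ m ih =>
    intro l hl
    rw [step6A]
    by_cases h : l.length > 15
    · rw [if_pos h, ih _ (by simp [List.length_dropLast]; omega),
        List.dropLast_eq_take, List.take_take]
      congr 1
      omega
    · rw [if_neg h, List.take_of_length_le (by omega)]

theorem step6A_eq (l : List Char) : step6A l = l.take 15 :=
  step6A_eq_aux l.length l le_rfl

theorem padA_eq {l : List Char} {t : Char} (ht : l.getLast? = some t) :
    padA l = l ++ List.replicate ((3 : Int) - (l.length : Int)).toNat t := by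
  rcases l with _ | ⟨a, _ | ⟨b, _ | ⟨c2, t'⟩⟩⟩
  · simp at ht
  · rw [show ((3 : Int) - (([a] : List Char).length : Int)).toNat = 2 by
      rw [show (([a] : List Char).length : Int) = 1 from rfl]; decide]
    have hat : a = t := by simpa using ht
    subst hat
    simp [padA, List.replicate]
  · rw [show ((3 : Int) - (([a, b] : List Char).length : Int)).toNat = 1 by
      rw [show (([a, b] : List Char).length : Int) = 2 from rfl]; decide]
    have hbt : b = t := by simpa using ht
    subst hbt
    simp [padA, List.replicate]
  · have h0 : ((3 : Int) - (((a :: b :: c2 :: t') : List Char).length : Int)).toNat = 0 := by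
      simp
      omega
    rw [h0]
    unfold padA
    rw [if_neg (by simp)]
    simp

-- ===== VERDICT (by name: the statement is the Claim_ definition above) =====
theorem solution_spec : Claim_equal_solution := by
  unfold Claim_equal_solution Spec_solution
  intro new_id _
  have hup : ∀ c ∈ PySem.Chars.lower new_id.toList, PySem.Chars.isupper c = false := by
    intro c hc
    simp only [PySem.Chars.lower, List.mem_map] at hc
    obtain ⟨d, -, rfl⟩ := hc
    exact lower_no_upper d
  simp only [solution, solution_alt]
  rw [PySem.List.foldl_append_if_eq_filter, List.nil_append, loop_eq0 _ hup]
  set L := PySem.Chars.lower new_id.toList with hLdef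
  set O := bpass [] L with hOdef
  have hOn : ndd O := bpass_ndd (by trivial) L
  rw [popA_head, popA_last, strip_eq hOn]
  set M := popLast (popHead O) with hMdef
  have hMn : ndd M := popLast_ndd (popHead_ndd hOn)
  have hMh : M.head? ≠ some '.' := popLast_head (popHead_head hOn)
  have h5 : (if M.length = 0 then M ++ ['a'] else M) = (if M = [] then ['a'] else M) := by
    by_cases hM : M = []
    · simp [hM]
    · simp [hM, List.length_eq_zero_iff]
  rw [h5]
  set S := if M = [] then ['a'] else M with hSdef
  have hSne : S ≠ [] := by
    rw [hSdef]
    by_cases hM : M = [] <;> simp [hM]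
  have hSh : S.head? ≠ some '.' := by
    rw [hSdef]
    by_cases hM : M = []
    · simp [hM]
    · simpa [hM] using hMh
  have hSn : ndd S := by
    rw [hSdef]
    by_cases hM : M = []
    · rw [if_pos hM]
      trivial
    · simpa [hM] using hMn
  rw [step6A_eq, PySem.List.slice_to S (show (0 : Int) ≤ 15 by norm_num),
    show ((15 : Int)).toNat = 15 from rfl]
  set T := List.take 15 S with hTdef
  have hTn : ndd T := ndd_take hSn 15
  have hTh : T.head? ≠ some '.' := by
    rw [hTdef, List.head?_take, if_neg (by norm_num)]
    exact hSh
  have hTne : T ≠ [] := by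
    intro h
    have h2 := congrArg List.head? h
    rw [hTdef, List.head?_take, if_neg (by norm_num)] at h2
    exact hSne (List.head?_eq_none_iff.mp (by simpa using h2))
  rw [PySem.List.pyGet?_neg_one,
    show (if T.getLast? = some '.' then T.dropLast else T) = popLast T from rfl,
    rstrip_eq hTn]
  set U := popLast T with hUdef
  have hUne : U ≠ [] := popLast_ne hTne hTh
  obtain ⟨t, ht⟩ : ∃ x, U.getLast? = some x := by
    cases h : U.getLast? with
    | none => exact absurd (List.getLast?_eq_none_iff.mp h) hUne
    | some x => exact ⟨x, rfl⟩
  rw [PySem.List.pyGet?_neg_one, ht]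
  dsimp only
  rw [padA_eq ht, PySem.List.pyRepeat_singleton]
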